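-- pv_equiv track=rewrite | github.com/Arpan243/JPMC | count_pairs_equal_1.py | count_pairs_with_same_ones
-- ===== SOURCE A (Python) =====
-- from collections import defaultdict
--
-- def count_pairs_with_same_ones(arr):
--     # Function to count the number of 1's in the binary representation
--     def count_ones(n):
--         return bin(n).count('1')
--
--     # Dictionary to store the count of numbers having the same number of 1's
--     count_map = defaultdict(int)
--
--     # Count how many numbers have the same count of 1's
--     for num in arr:
--         ones_count = count_ones(num)
--         count_map[ones_count] += 1
--
--     # Now count the number of valid pairs
--     total_pairs = 0
--     for count in count_map.values():
--         if count > 1: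
--             total_pairs += (count * (count - 1)) // 2
--
--     return total_pairs
-- ===== SOURCE B (Python) =====
-- def count_pairs_with_same_ones(arr):
--     # One incremental pass: for each number, pairs it forms = how many earlier
--     # numbers had the same popcount.
--     seen = {}
--     total = 0
--     for num in arr:
--         ones = bin(num).count('1')
--         c = seen.get(ones, 0)
--         total += c
--         seen[ones] = c + 1
--     return total
-- ===== Notes on version B (the rewrite author's own statement) =====
-- stated objective: alternative
-- what changed: Replaces the two-phase build-a-counter-then-sum-C(c,2)-over-its-values structure by a single incremental pass that adds, for each element, the number of previously seen elements with the same popcount.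
import Mathlib
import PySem

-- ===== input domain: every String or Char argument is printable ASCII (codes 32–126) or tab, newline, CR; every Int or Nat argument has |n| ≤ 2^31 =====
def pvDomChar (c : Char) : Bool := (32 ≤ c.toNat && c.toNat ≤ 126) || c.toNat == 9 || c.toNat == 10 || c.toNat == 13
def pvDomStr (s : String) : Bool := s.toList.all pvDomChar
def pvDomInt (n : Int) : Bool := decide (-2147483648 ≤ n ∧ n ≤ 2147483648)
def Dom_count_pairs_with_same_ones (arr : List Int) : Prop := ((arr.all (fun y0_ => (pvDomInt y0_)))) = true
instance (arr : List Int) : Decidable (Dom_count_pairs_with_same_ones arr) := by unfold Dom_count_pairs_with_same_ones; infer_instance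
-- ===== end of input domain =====

-- B replaces A's build-counter-then-sum-C(c,2)-over-values structure by a single
-- incremental pass adding, per element, the count of earlier equal-popcount elements.

-- bin(n).count('1') — PySem.Int.bitCount is exact here, incl. negatives (reads |n|)
def pvOnes (n : Int) : Nat := PySem.Int.bitCount n

-- ===== PORT A =====
def count_pairs_with_same_ones (arr : List Int) : Int :=
  let count_map : PySem.Dict Nat Int :=
    arr.foldl (fun d num => d.modify (pvOnes num) 0 (· + 1)) PySem.Dict.empty
  count_map.values.foldl
    (fun total c => if c > 1 then total + PySem.Int.floordiv (c * (c - 1)) 2 else total) 0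

-- ===== PORT B =====
def count_pairs_with_same_ones_alt (arr : List Int) : Int :=
  (arr.foldl (fun st num =>
      let ones := pvOnes num
      let c := st.1.getD ones 0
      (st.1.insert ones (c + 1), st.2 + c))
    ((PySem.Dict.empty : PySem.Dict Nat Int), (0 : Int))).2

-- ===== PRECONDITION & SPEC =====
def Spec_count_pairs_with_same_ones (arr : List Int) (out : Int) : Prop := out = count_pairs_with_same_ones_alt arr
instance (arr : List Int) (out : Int) : Decidable (Spec_count_pairs_with_same_ones arr out) := by unfold Spec_count_pairs_with_same_ones; infer_instance

-- ===== CLAIM (what is proved, stated in full; the proofs are below) =====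
def Claim_equal_count_pairs_with_same_ones : Prop := ∀ (arr : List Int), Dom_count_pairs_with_same_ones arr → Spec_count_pairs_with_same_ones arr (count_pairs_with_same_ones arr)

-- ===== LEMMAS AND PROOFS =====

-- pvG c = A's contribution of a bucket of size c
def pvG (c : Int) : Int := if c > 1 then PySem.Int.floordiv (c * (c - 1)) 2 else 0

lemma pvG_succ (c : Int) (hc : 0 ≤ c) : pvG (c + 1) = pvG c + c := by
  unfold pvG
  rcases lt_trichotomy c 1 with h | rfl | h
  · have h0 : c = 0 := by omega
    subst h0; decide
  · decide
  · rw [if_pos (by omega), if_pos h,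
        PySem.Int.floordiv_eq_ediv_of_pos (by norm_num),
        PySem.Int.floordiv_eq_ediv_of_pos (by norm_num)]
    have he : (c + 1) * (c + 1 - 1) = c * (c - 1) + c * 2 := by ring
    rw [he, Int.add_mul_ediv_right _ _ (by norm_num)]

-- A's second loop is t + Σ pvG over the values
lemma pvSumShape (l : List Int) (t : Int) :
    l.foldl (fun total c => if c > 1 then total + PySem.Int.floordiv (c * (c - 1)) 2 else total) t
      = t + (l.map pvG).sum := by
  induction l generalizing t with
  | nil => simp
  | cons x xs ih =>
    simp only [List.foldl_cons, List.map_cons, List.sum_cons, ih]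
    unfold pvG
    split_ifs <;> ring

def pvSumG (d : PySem.Dict Nat Int) : Int := (d.values.map pvG).sum

-- replacing one entry of a nodup key list changes the keyed sum by the delta at that key
lemma pvSum_map_update (ks : List Nat) (f f' : Nat → Int) (k : Nat)
    (hn : ks.Nodup) (hk : k ∈ ks) (hoff : ∀ j ∈ ks, j ≠ k → f' j = f j) :
    (ks.map f').sum = (ks.map f).sum + (f' k - f k) := by
  induction ks with
  | nil => cases hk
  | cons a t ih =>
    rcases List.nodup_cons.mp hn with ⟨hat, hnt⟩
    rcases List.mem_cons.mp hk with rfl | hkt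
    · have ht : t.map f' = t.map f := List.map_congr_left (fun j hj =>
        hoff j (List.mem_cons_of_mem _ hj) (fun h => hat (h ▸ hj)))
      simp [ht]; ring
    · have ha : f' a = f a := hoff a (List.mem_cons_self) (fun h => hat (h ▸ hkt))
      have ih' := ih hnt hkt (fun j hj hjk => hoff j (List.mem_cons_of_mem _ hj) hjk)
      simp [ha, ih']; ring

lemma pvSumG_insert (d : PySem.Dict Nat Int) (k : Nat) (hn : d.keys.Nodup) :
    pvSumG (d.insert k (d.getD k 0 + 1)) = pvSumG d + pvG (d.getD k 0 + 1) - pvG (d.getD k 0) := by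
  unfold pvSumG
  by_cases hc : d.contains k = true
  · have hkeys : (d.insert k (d.getD k 0 + 1)).keys = d.keys :=
      PySem.Dict.keys_insert_of_contains d _ hc
    have hnd' : (d.insert k (d.getD k 0 + 1)).keys.Nodup := hkeys ▸ hn
    rw [PySem.Dict.values_eq_map_keys _ hnd' 0, PySem.Dict.values_eq_map_keys d hn 0,
        hkeys, List.map_map, List.map_map]
    have hk : k ∈ d.keys := (PySem.Dict.contains_iff_mem_keys d k).mp hc
    have hrw := pvSum_map_update d.keys
      (fun j => pvG (d.getD j 0))
      (fun j => pvG ((d.insert k (d.getD k 0 + 1)).getD j 0)) k hn hk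
      (fun j _ hjk => by simp [PySem.Dict.getD_insert, hjk])
    simp only [Function.comp_def] at *
    rw [hrw]
    simp only [PySem.Dict.getD_insert_self]
    ring
  · have hc' : d.contains k = false := by simpa using hc
    have h0 : d.getD k 0 = 0 := PySem.Dict.getD_of_not_contains d _ hc'
    have hi : (d.insert k (d.getD k 0 + 1)).items = d.items ++ [(k, d.getD k 0 + 1)] :=
      PySem.Dict.items_insert_of_not_contains d _ hc'
    have hv : (d.insert k (d.getD k 0 + 1)).values = d.values ++ [d.getD k 0 + 1] := by
      simp [PySem.Dict.values, hi]
    rw [hv, h0]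
    simp [pvG]

-- B's loop invariant over the original Int list: the running total tracks the
-- pvG-sum of the growing popcount counter (which is exactly A's first loop from d)
lemma pvBinv (arr : List Int) : ∀ (d : PySem.Dict Nat Int) (t : Int),
    d.keys.Nodup → (∀ v, 0 ≤ d.getD v 0) →
    (arr.foldl (fun st num =>
        (st.1.insert (pvOnes num) (st.1.getD (pvOnes num) 0 + 1),
         st.2 + st.1.getD (pvOnes num) 0)) (d, t)).2
      = t + pvSumG (arr.foldl (fun d num => d.modify (pvOnes num) 0 (· + 1)) d) - pvSumG d := by
  induction arr with
  | nil => intro d t _ _; simp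
  | cons x rest ih =>
    intro d t hn hpos
    simp only [List.foldl_cons]
    have hmod : d.modify (pvOnes x) 0 (· + 1) = d.insert (pvOnes x) (d.getD (pvOnes x) 0 + 1) := rfl
    rw [hmod, ih (d.insert (pvOnes x) (d.getD (pvOnes x) 0 + 1)) (t + d.getD (pvOnes x) 0)
        (PySem.Dict.nodup_keys_insert d _ _ hn)
        (by intro v
            rw [PySem.Dict.getD_insert]
            split_ifs with hv
            · have := hpos (pvOnes x); omega
            · exact hpos v)]
    rw [pvSumG_insert d (pvOnes x) hn, pvG_succ _ (hpos (pvOnes x))]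
    ring

-- ===== VERDICT (by name: the statement is the Claim_ definition above) =====
theorem count_pairs_with_same_ones_spec : Claim_equal_count_pairs_with_same_ones := by
  intro arr _
  show count_pairs_with_same_ones arr = count_pairs_with_same_ones_alt arr
  show (arr.foldl (fun d num => d.modify (pvOnes num) 0 (· + 1))
          (PySem.Dict.empty : PySem.Dict Nat Int)).values.foldl
        (fun total c => if c > 1 then total + PySem.Int.floordiv (c * (c - 1)) 2 else total) 0
      = (arr.foldl (fun st num =>
          (st.1.insert (pvOnes num) (st.1.getD (pvOnes num) 0 + 1),
           st.2 + st.1.getD (pvOnes num) 0))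
          ((PySem.Dict.empty : PySem.Dict Nat Int), (0 : Int))).2
  rw [pvSumShape, pvBinv arr PySem.Dict.empty 0
      (by simp [PySem.Dict.keys, PySem.Dict.empty])
      (by intro v; simp [PySem.Dict.getD_empty])]
  unfold pvSumG
  simp [PySem.Dict.values, PySem.Dict.empty]
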